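-- pv_equiv track=rewrite | github.com/sophus0505/Six-Degrees-of-IMDB | bygg_graph.py | bfs_shortest_paths_from
-- ===== SOURCE A (Python) =====
-- from collections import defaultdict, deque, OrderedDict
--
-- def bfs_shortest_paths_from(G, s):
--     _, E, _, _ = G
--     parents = {s : None}
--     queue = deque([s])
--     result = []
--
--     while queue:
--         v = deque.popleft(queue)
--         result.append(v)
--         for u in E[v]:
--             if u not in parents:
--                 parents[u] = v
--                 queue.append(u)
--     return parents
-- ===== SOURCE B (Python) =====
-- def bfs_shortest_paths_from(G, s):
--     _, E, _, _ = G
--     pairs = [(s, None)]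
--     visited = {s}
--     frontier = [s]
--     while frontier:
--         discovered = []
--         for v in frontier:
--             for u in E[v]:
--                 if u not in visited:
--                     visited.add(u)
--                     discovered.append((u, v))
--         pairs += discovered
--         frontier = [u for u, _ in discovered]
--     return dict(pairs)
-- ===== Notes on version B (the rewrite author's own statement) =====
-- stated objective: alternative
-- what changed: Replaces the FIFO-deque BFS that mutates one parents dict with a level-synchronized BFS that keeps a separate visited set and accumulates (child, parent) discovery pairs per level, concatenating the per-level pair lists and building the dict once at the end.
-- outside the precondition, e.g. on bfs_shortest_paths_from((set(), {'a': [], 'c': ['d']}, {}, {}), 'a'): A returns {'a': None}, B returns {'a': None}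
import Mathlib
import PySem

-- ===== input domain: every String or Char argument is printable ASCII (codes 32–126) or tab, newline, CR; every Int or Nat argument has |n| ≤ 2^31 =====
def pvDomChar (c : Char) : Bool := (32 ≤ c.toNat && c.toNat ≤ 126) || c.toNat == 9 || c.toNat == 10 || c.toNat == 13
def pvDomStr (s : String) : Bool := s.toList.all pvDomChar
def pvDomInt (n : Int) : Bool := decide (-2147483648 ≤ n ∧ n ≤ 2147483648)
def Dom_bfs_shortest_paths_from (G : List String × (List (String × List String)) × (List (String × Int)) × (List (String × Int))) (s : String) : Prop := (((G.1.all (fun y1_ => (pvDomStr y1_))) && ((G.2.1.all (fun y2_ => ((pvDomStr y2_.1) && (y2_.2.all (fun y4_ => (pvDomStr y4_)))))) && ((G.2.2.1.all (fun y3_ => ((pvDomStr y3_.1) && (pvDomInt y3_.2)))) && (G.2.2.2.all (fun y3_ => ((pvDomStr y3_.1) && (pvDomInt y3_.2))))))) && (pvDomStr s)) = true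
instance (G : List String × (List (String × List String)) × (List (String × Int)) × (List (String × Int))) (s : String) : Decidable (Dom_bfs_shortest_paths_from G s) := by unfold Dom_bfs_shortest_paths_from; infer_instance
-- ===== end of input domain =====

-- B re-implements A's single-dict FIFO-deque BFS as a level-synchronized BFS over a separate
-- visited set that collects (child, parent) pairs per level and builds the dict once at the end;
-- the return values are proved equal.

-- ===== PORT A =====
-- E[v] on the association-list dict (first match; none = Python's KeyError)
def pvLookup (E : List (String × List String)) (v : String) : Option (List String) :=
  (E.find? (fun p => p.1 == v)).map (·.2)

-- A's inner statement 'if u not in parents: parents[u] = v; queue.append(u)'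
def pvStep (v : String) (st : PySem.Dict String (Option String) × List String) (u : String) :
    PySem.Dict String (Option String) × List String :=
  if st.1.contains u then st else (st.1.insert u (some v), st.2 ++ [u])

-- A's 'while queue:' loop; fuel is a totality guard only (1 + total neighbour count bounds the number of pops)
def pvLoopA (E : List (String × List String)) :
    Nat → PySem.Dict String (Option String) → List String → List String → PySem.Dict String (Option String)
  | _, parents, [], _ => parents
  | 0, parents, _ :: _, _ => parents
  | fuel+1, parents, v :: queue, result =>
    match pvLookup E v with
    | none => parents   -- Python raises KeyError here (excluded by Pre_)
    | some ns =>
      let st := ns.foldl (pvStep v) (parents, queue)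
      pvLoopA E fuel st.1 st.2 (result ++ [v])

def bfs_shortest_paths_from (G : List String × (List (String × List String)) × (List (String × Int)) × (List (String × Int))) (s : String) : List (String × Option String) :=
  let E := G.2.1
  (pvLoopA E (s :: E.flatMap (·.2)).length (PySem.Dict.empty.insert s none) [s] []).items

-- ===== PORT B =====
-- B's inner statement 'if u not in visited: visited.add(u); discovered.append((u, v))'
def pvMark (v : String) (st : PySem.Set String × List (String × Option String)) (u : String) :
    PySem.Set String × List (String × Option String) :=
  if st.1.contains u then st else (st.1.add u, st.2 ++ [(u, some v)])

-- B's level pass 'for v in frontier: for u in E[v]: …', threading (visited, discovered)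
def pvDiscover (E : List (String × List String)) (f : List String)
    (st : PySem.Set String × List (String × Option String)) :
    PySem.Set String × List (String × Option String) :=
  f.foldl (fun st v =>
    match pvLookup E v with
    | none => st        -- Python raises KeyError here (excluded by Pre_)
    | some ns => ns.foldl (pvMark v) st) st

-- B's 'while frontier:' loop over levels, accumulating the pairs list; fuel is a totality guard only
def pvLoopB (E : List (String × List String)) :
    Nat → PySem.Set String → List (String × Option String) → List String → List (String × Option String)
  | _, _, pairs, [] => pairs
  | 0, _, pairs, _ :: _ => pairs
  | fuel+1, visited, pairs, v :: fs =>
    let st := pvDiscover E (v :: fs) (visited, [])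
    pvLoopB E fuel st.1 (pairs ++ st.2) (st.2.map (·.1))

def bfs_shortest_paths_from_alt (G : List String × (List (String × List String)) × (List (String × Int)) × (List (String × Int))) (s : String) : List (String × Option String) :=
  let E := G.2.1
  (PySem.Dict.ofList
    (pvLoopB E (s :: E.flatMap (·.2)).length (PySem.Set.add PySem.Set.empty s) [(s, none)] [s])).items

-- ===== PRECONDITION & SPEC =====
-- Python A raises KeyError when BFS reaches a vertex missing from the dict E.  Pre_ excludes those inputs by
-- requiring that s is a key of E and E's adjacency lists mention only keys of E (the standard well-formed-graph
-- representation).  This is slightly narrower than A's exact domain: it also excludes graphs whose UNREACHABLE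
-- adjacency entries mention missing keys, on which A still returns (see the cite; A and B agree there anyway).
def Pre_bfs_shortest_paths_from (G : List String × (List (String × List String)) × (List (String × Int)) × (List (String × Int))) (s : String) : Prop :=
  (G.2.1.any (fun p => p.1 == s)
    && G.2.1.all (fun p => p.2.all (fun u => G.2.1.any (fun q => q.1 == u)))) = true
instance (G : List String × (List (String × List String)) × (List (String × Int)) × (List (String × Int))) (s : String) : Decidable (Pre_bfs_shortest_paths_from G s) := by unfold Pre_bfs_shortest_paths_from; infer_instance

def pvWitness_bfs_shortest_paths_from : (List String × (List (String × List String)) × (List (String × Int)) × (List (String × Int))) × String :=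
  (([], [("a", ["b"]), ("b", ["a", "b"])], [], []), "a")

def Spec_bfs_shortest_paths_from (G : List String × (List (String × List String)) × (List (String × Int)) × (List (String × Int))) (s : String) (out : List (String × Option String)) : Prop := out = bfs_shortest_paths_from_alt G s
instance (G : List String × (List (String × List String)) × (List (String × Int)) × (List (String × Int))) (s : String) (out : List (String × Option String)) : Decidable (Spec_bfs_shortest_paths_from G s out) := by unfold Spec_bfs_shortest_paths_from; infer_instance

-- ===== CLAIM (what is proved, stated in full; the proofs are below) =====
def Claim_equal_bfs_shortest_paths_from : Prop := ∀ (G : List String × (List (String × List String)) × (List (String × Int)) × (List (String × Int))) (s : String), Dom_bfs_shortest_paths_from G s → Pre_bfs_shortest_paths_from G s → Spec_bfs_shortest_paths_from G s (bfs_shortest_paths_from G s)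

-- ===== LEMMAS AND PROOFS =====

-- proof-side view of one LEVEL of A's loop (f vertices popped in a row), threading (parents, queue-tail)
def pvLevelA (E : List (String × List String))
    (f : List String) (st : PySem.Dict String (Option String) × List String) :
    PySem.Dict String (Option String) × List String :=
  f.foldl (fun st v =>
    match pvLookup E v with
    | none => st
    | some ns => ns.foldl (pvStep v) st) st

-- the relational invariant between A's per-level state and B's per-level state
def pvInv (base : List (String × Option String))
    (p : PySem.Dict String (Option String)) (acc : List String)
    (vis : PySem.Set String) (new : List (String × Option String)) : Prop :=
  vis = p.keys ∧ p.items = base ++ new ∧ acc = new.map (·.1)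

theorem pv_contains_agree (p : PySem.Dict String (Option String)) (u : String) :
    PySem.Set.contains p.keys u = p.contains u := by
  rw [PySem.Set.contains_eq_listContains, PySem.Dict.contains_eq_decide_mem_keys]
  simp

theorem pvInv_mark (base : List (String × Option String)) (v u : String)
    (p : PySem.Dict String (Option String)) (acc : List String)
    (vis : PySem.Set String) (new : List (String × Option String))
    (h : pvInv base p acc vis new) :
    pvInv base (pvStep v (p, acc) u).1 (pvStep v (p, acc) u).2
      (pvMark v (vis, new) u).1 (pvMark v (vis, new) u).2 := by
  obtain ⟨hk, hi, ha⟩ := h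
  subst hk
  have hag := pv_contains_agree p u
  by_cases hc : p.contains u = true
  · have hmc : PySem.Set.contains p.keys u = true := by rw [hag]; exact hc
    simp only [pvStep, pvMark, hc, hmc, if_true]
    exact ⟨rfl, hi, ha⟩
  · have hc' : p.contains u = false := by simp_all
    have hnm : u ∉ p.keys := by
      intro hm
      rw [PySem.Dict.contains_eq_decide_mem_keys] at hc'
      simp [hm] at hc'
    simp only [pvStep, pvMark, hag, hc', Bool.false_eq_true, if_false]
    refine ⟨?_, ?_, ?_⟩
    · rw [PySem.Set.add_of_not_mem hnm, PySem.Dict.keys_insert_of_not_contains _ _ hc']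
    · rw [PySem.Dict.items_insert_of_not_contains _ _ hc', hi, List.append_assoc]
    · simp [ha]

theorem pvInv_marks (base : List (String × Option String)) (v : String) (ns : List String) :
    ∀ (p : PySem.Dict String (Option String)) (acc : List String)
      (vis : PySem.Set String) (new : List (String × Option String)),
    pvInv base p acc vis new →
    pvInv base (ns.foldl (pvStep v) (p, acc)).1 (ns.foldl (pvStep v) (p, acc)).2
      (ns.foldl (pvMark v) (vis, new)).1 (ns.foldl (pvMark v) (vis, new)).2 := by
  induction ns with
  | nil => intro p acc vis new h; exact h
  | cons u ns ih =>
    intro p acc vis new h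
    have h1 := pvInv_mark base v u p acc vis new h
    simpa only [List.foldl_cons] using
      ih (pvStep v (p, acc) u).1 (pvStep v (p, acc) u).2
        (pvMark v (vis, new) u).1 (pvMark v (vis, new) u).2 h1

theorem pvInv_level (base : List (String × Option String))
    (E : List (String × List String)) (f : List String) :
    ∀ (p : PySem.Dict String (Option String)) (acc : List String)
      (vis : PySem.Set String) (new : List (String × Option String)),
    pvInv base p acc vis new →
    pvInv base (pvLevelA E f (p, acc)).1 (pvLevelA E f (p, acc)).2
      (pvDiscover E f (vis, new)).1 (pvDiscover E f (vis, new)).2 := by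
  induction f with
  | nil => intro p acc vis new h; exact h
  | cons v f ih =>
    intro p acc vis new h
    simp only [pvLevelA, pvDiscover, List.foldl_cons]
    cases hl : pvLookup E v with
    | none => simpa only [pvLevelA, pvDiscover] using ih p acc vis new h
    | some ns =>
      have h1 := pvInv_marks base v ns p acc vis new h
      simpa only [pvLevelA, pvDiscover] using
        ih (ns.foldl (pvStep v) (p, acc)).1 (ns.foldl (pvStep v) (p, acc)).2
          (ns.foldl (pvMark v) (vis, new)).1 (ns.foldl (pvMark v) (vis, new)).2 h1

-- nodup of keys is preserved through A's loop
theorem pvStep_nodup (v : String) (ns : List String) :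
    ∀ (p : PySem.Dict String (Option String)) (acc : List String),
    p.keys.Nodup → (ns.foldl (pvStep v) (p, acc)).1.keys.Nodup := by
  induction ns with
  | nil => intro p acc h; exact h
  | cons u ns ih =>
    intro p acc h
    by_cases hc : p.contains u = true
    · simpa only [List.foldl_cons, pvStep, hc, if_true] using ih p acc h
    · simp only [List.foldl_cons, pvStep, hc, Bool.false_eq_true, if_false]
      exact ih _ _ (PySem.Dict.nodup_keys_insert p u (some v) h)

-- number of l-elements not yet in the parents dict (the BFS potential, with the queue length)
def pvFL (l : List String) (p : PySem.Dict String (Option String)) : Nat :=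
  (l.filter (fun x => !(p.contains x))).length

theorem pv_filter_succ_le {α : Type} {l : List α} {P Q : α → Bool} {u : α}
    (hu : u ∈ l) (himp : ∀ x, Q x = true → P x = true) (hQu : Q u = false) (hPu : P u = true) :
    (l.filter Q).length + 1 ≤ (l.filter P).length := by
  have hmono : ∀ (m : List α), (m.filter Q).length ≤ (m.filter P).length := by
    intro m
    rw [← List.countP_eq_length_filter, ← List.countP_eq_length_filter]
    exact List.countP_mono_left (fun x _ hx => himp x hx)
  induction l with
  | nil => cases hu
  | cons a l ih =>
    simp only [List.filter_cons]
    rcases List.mem_cons.1 hu with rfl | ha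
    · simp only [hQu, hPu, if_true, Bool.false_eq_true, if_false, List.length_cons]
      have := hmono l
      omega
    · by_cases hQa : Q a = true
      · simp only [hQa, himp a hQa, if_true, List.length_cons]
        have := ih ha
        omega
      · simp only [hQa, Bool.false_eq_true, if_false]
        by_cases hPa : P a = true
        · simp only [hPa, if_true, List.length_cons]
          have := ih ha
          omega
        · simp only [hPa, Bool.false_eq_true, if_false]
          exact ih ha

theorem pvStep_prefix (v : String) (ns : List String) :
    ∀ (p : PySem.Dict String (Option String)) (rest acc : List String),
    ns.foldl (pvStep v) (p, rest ++ acc)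
      = ((ns.foldl (pvStep v) (p, acc)).1, rest ++ (ns.foldl (pvStep v) (p, acc)).2) := by
  induction ns with
  | nil => intro p rest acc; rfl
  | cons u ns ih =>
    intro p rest acc
    by_cases h : p.contains u = true
    · simp [List.foldl_cons, pvStep, h, ih]
    · simp only [List.foldl_cons, pvStep, h]
      simp only [Bool.false_eq_true, if_false, List.append_assoc]
      exact ih _ rest (acc ++ [u])

theorem pvStep_mu (l : List String) (v : String) (ns : List String) :
    ∀ (p : PySem.Dict String (Option String)) (acc : List String),
    (∀ u ∈ ns, u ∈ l) →
    pvFL l (ns.foldl (pvStep v) (p, acc)).1 + (ns.foldl (pvStep v) (p, acc)).2.length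
      ≤ pvFL l p + acc.length := by
  induction ns with
  | nil => intro p acc _; exact le_rfl
  | cons u ns ih =>
    intro p acc hmem
    by_cases h : p.contains u = true
    · simp only [List.foldl_cons, pvStep, h, if_true]
      exact ih p acc (fun x hx => hmem x (List.mem_cons_of_mem _ hx))
    · simp only [List.foldl_cons, pvStep, h, Bool.false_eq_true, if_false]
      have h1 : pvFL l (p.insert u (some v)) + 1 ≤ pvFL l p := by
        apply pv_filter_succ_le (u := u) (hmem u (List.mem_cons_self))
        · intro x hx
          simp only [Bool.not_eq_true', PySem.Dict.contains_insert] at hx ⊢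
          exact (Bool.or_eq_false_iff.1 hx).2
        · simp
        · simp [h]
      have h2 := ih (p.insert u (some v)) (acc ++ [u])
        (fun x hx => hmem x (List.mem_cons_of_mem _ hx))
      simp only [List.length_append, List.length_cons, List.length_nil] at h2 ⊢
      omega

theorem pvStep_sub (v : String) (ns : List String) :
    ∀ (p : PySem.Dict String (Option String)) (acc : List String) (x : String),
    x ∈ (ns.foldl (pvStep v) (p, acc)).2 → x ∈ acc ∨ x ∈ ns := by
  induction ns with
  | nil => intro p acc x hx; exact Or.inl hx
  | cons u ns ih =>
    intro p acc x hx
    by_cases h : p.contains u = true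
    · simp only [List.foldl_cons, pvStep, h, if_true] at hx
      rcases ih p acc x hx with h' | h'
      · exact Or.inl h'
      · exact Or.inr (List.mem_cons_of_mem _ h')
    · simp only [List.foldl_cons, pvStep, h, Bool.false_eq_true, if_false] at hx
      rcases ih _ (acc ++ [u]) x hx with h' | h'
      · rcases List.mem_append.1 h' with h'' | h''
        · exact Or.inl h''
        · exact Or.inr (by simp at h''; simp [h''])
      · exact Or.inr (List.mem_cons_of_mem _ h')

theorem pvLevelA_mu (E : List (String × List String)) (l : List String) (f : List String) :
    ∀ (p : PySem.Dict String (Option String)) (acc : List String),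
    (∀ v ns, pvLookup E v = some ns → ∀ u ∈ ns, u ∈ l) →
    pvFL l (pvLevelA E f (p, acc)).1 + (pvLevelA E f (p, acc)).2.length ≤ pvFL l p + acc.length := by
  induction f with
  | nil => intro p acc _; exact le_rfl
  | cons v f ih =>
    intro p acc hvals
    simp only [pvLevelA, List.foldl_cons]
    cases hl : pvLookup E v with
    | none => simpa only [pvLevelA] using ih p acc hvals
    | some ns =>
      have h1 := pvStep_mu l v ns p acc (hvals v ns hl)
      have h2 := ih (ns.foldl (pvStep v) (p, acc)).1 (ns.foldl (pvStep v) (p, acc)).2 hvals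
      simp only [pvLevelA] at h2 ⊢
      calc _ ≤ _ := h2
        _ ≤ _ := h1

theorem pvLevelA_sub (E : List (String × List String)) (f : List String) :
    ∀ (p : PySem.Dict String (Option String)) (acc : List String) (x : String),
    x ∈ (pvLevelA E f (p, acc)).2 →
    x ∈ acc ∨ ∃ v ∈ f, ∃ ns, pvLookup E v = some ns ∧ x ∈ ns := by
  induction f with
  | nil => intro p acc x hx; exact Or.inl hx
  | cons v f ih =>
    intro p acc x hx
    simp only [pvLevelA, List.foldl_cons] at hx
    cases hl : pvLookup E v with
    | none =>
      rw [hl] at hx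
      rcases ih p acc x hx with h | ⟨w, hw, ns, hns, hxn⟩
      · exact Or.inl h
      · exact Or.inr ⟨w, List.mem_cons_of_mem _ hw, ns, hns, hxn⟩
    | some ns =>
      rw [hl] at hx
      rcases ih _ _ x hx with h | ⟨w, hw, ms, hms, hxm⟩
      · rcases pvStep_sub v ns p acc x h with h' | h'
        · exact Or.inl h'
        · exact Or.inr ⟨v, List.mem_cons_self, ns, hl, h'⟩
      · exact Or.inr ⟨w, List.mem_cons_of_mem _ hw, ms, hms, hxm⟩

theorem pvLoopA_nil (E : List (String × List String)) (fuel : Nat)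
    (p : PySem.Dict String (Option String)) (r : List String) :
    pvLoopA E fuel p [] r = p := by
  cases fuel <;> rfl

theorem pvLoopA_level (E : List (String × List String)) (f : List String) :
    ∀ (p : PySem.Dict String (Option String)) (acc r : List String) (fuel : Nat),
    (∀ v ∈ f, (pvLookup E v).isSome) →
    pvLoopA E (f.length + fuel) p (f ++ acc) r
      = pvLoopA E fuel (pvLevelA E f (p, acc)).1 (pvLevelA E f (p, acc)).2 (r ++ f) := by
  induction f with
  | nil => intro p acc r fuel _; simp [pvLevelA]
  | cons v f ih =>
    intro p acc r fuel hf
    have hv : (pvLookup E v).isSome := hf v List.mem_cons_self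
    cases hl : pvLookup E v with
    | none => rw [hl] at hv; cases hv
    | some ns =>
      have hstep : pvLoopA E (f.length + fuel + 1) p (v :: (f ++ acc)) r
          = pvLoopA E (f.length + fuel)
              (ns.foldl (pvStep v) (p, f ++ acc)).1 (ns.foldl (pvStep v) (p, f ++ acc)).2
              (r ++ [v]) := by
        simp [pvLoopA, hl]
      have harith : (v :: f).length + fuel = f.length + fuel + 1 := by
        simp [List.length_cons]; omega
      rw [List.cons_append, harith, hstep, pvStep_prefix v ns p f acc]
      have := ih (ns.foldl (pvStep v) (p, acc)).1 (ns.foldl (pvStep v) (p, acc)).2 (r ++ [v]) fuel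
        (fun w hw => hf w (List.mem_cons_of_mem _ hw))
      rw [this]
      simp only [pvLevelA, List.foldl_cons, hl]
      simp [List.append_assoc]

theorem pvLoopA_level0 (E : List (String × List String)) (f : List String)
    (p : PySem.Dict String (Option String)) (r : List String) (fuel : Nat)
    (hf : ∀ v ∈ f, (pvLookup E v).isSome) :
    pvLoopA E (f.length + fuel) p f r
      = pvLoopA E fuel (pvLevelA E f (p, [])).1 (pvLevelA E f (p, [])).2 (r ++ f) := by
  have := pvLoopA_level E f p [] r fuel hf
  simpa using this

-- the main simulation: B's level loop, started from A's keys and items, computes A's final items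
theorem pvMain (E : List (String × List String)) (l : List String) :
    ∀ (fuelB : Nat) (p : PySem.Dict String (Option String)) (f r : List String) (fuelA : Nat),
    (∀ v ns, pvLookup E v = some ns → ∀ u ∈ ns, u ∈ l) →
    (∀ v ns, pvLookup E v = some ns → ∀ u ∈ ns, (pvLookup E u).isSome) →
    (∀ v ∈ f, (pvLookup E v).isSome) →
    pvFL l p + f.length ≤ fuelA → pvFL l p + f.length ≤ fuelB →
    pvLoopB E fuelB p.keys p.items f = (pvLoopA E fuelA p f r).items := by
  intro fuelB
  induction fuelB with
  | zero =>
    intro p f r fuelA _ _ _ _ hB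
    have hf : f = [] := by
      cases f with
      | nil => rfl
      | cons a f => simp [List.length_cons] at hB
    subst hf
    rw [pvLoopA_nil]
    rfl
  | succ fuelB ih =>
    intro p f r fuelA hvals hclos hf hA hB
    cases f with
    | nil => rw [pvLoopA_nil]; rfl
    | cons v fs =>
      have hlen : (v :: fs).length ≤ fuelA := by omega
      have harith : fuelA = (v :: fs).length + (fuelA - (v :: fs).length) :=
        (Nat.add_sub_cancel' hlen).symm
      rw [harith, pvLoopA_level0 E (v :: fs) p r (fuelA - (v :: fs).length) hf]
      set st := pvLevelA E (v :: fs) (p, []) with hst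
      have hinv : pvInv p.items p [] p.keys [] := ⟨rfl, by simp, rfl⟩
      have hlev := pvInv_level p.items E (v :: fs) p [] p.keys [] hinv
      rw [← hst] at hlev
      obtain ⟨hk, hi, hacc⟩ := hlev
      have hRHS : pvLoopB E (fuelB + 1) p.keys p.items (v :: fs)
          = pvLoopB E fuelB (pvDiscover E (v :: fs) (p.keys, [])).1
              (p.items ++ (pvDiscover E (v :: fs) (p.keys, [])).2)
              ((pvDiscover E (v :: fs) (p.keys, [])).2.map (·.1)) := rfl
      rw [hRHS, hk, ← hi, ← hacc]
      have hmu := pvLevelA_mu E l (v :: fs) p [] hvals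
      simp only [List.length_nil, Nat.add_zero] at hmu
      rw [← hst] at hmu
      apply ih _ _ _ _ hvals hclos
      · intro w hw
        rcases pvLevelA_sub E (v :: fs) p [] w hw with h | ⟨z, _, ns, hns, hwn⟩
        · cases h
        · exact hclos z ns hns w hwn
      · simp only [List.length_cons] at hA ⊢
        omega
      · simp only [List.length_cons] at hB ⊢
        omega

-- dict(pairs) on a list with distinct keys has exactly that items list
theorem pv_items_ofList (l : List (String × Option String)) (h : (l.map Prod.fst).Nodup) :
    (PySem.Dict.ofList l).items = l := by
  unfold PySem.Dict.ofList PySem.Dict.update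
  rw [PySem.Dict.items_foldl_insert_fresh l Prod.fst Prod.snd _ (by intro a _; rfl) h]
  simp [PySem.Dict.empty]

theorem pvLoopA_nodup (E : List (String × List String)) :
    ∀ (fuel : Nat) (p : PySem.Dict String (Option String)) (f r : List String),
    p.keys.Nodup → (pvLoopA E fuel p f r).keys.Nodup := by
  intro fuel
  induction fuel with
  | zero =>
    intro p f r h
    cases f <;> exact h
  | succ fuel ih =>
    intro p f r h
    cases f with
    | nil => exact h
    | cons v fs =>
      simp only [pvLoopA]
      cases hl : pvLookup E v with
      | none => exact h
      | some ns => exact ih _ _ _ (pvStep_nodup v ns p fs h)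

-- ===== VERDICT (by name: the statement is the Claim_ definition above) =====
theorem bfs_shortest_paths_from_spec : Claim_equal_bfs_shortest_paths_from := by
  intro G s _ hPre
  unfold Spec_bfs_shortest_paths_from bfs_shortest_paths_from bfs_shortest_paths_from_alt
  simp only []
  set E := G.2.1 with hE
  unfold Pre_bfs_shortest_paths_from at hPre
  rw [Bool.and_eq_true] at hPre
  obtain ⟨hs, hcl⟩ := hPre
  have hmemlookup : ∀ (u : String), (E.any (fun q => q.1 == u)) = true → (pvLookup E u).isSome := by
    intro u hu
    rw [List.any_eq_true] at hu
    obtain ⟨q, hq, hq2⟩ := hu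
    unfold pvLookup
    rw [Option.isSome_map]
    rw [List.find?_isSome]
    exact ⟨q, hq, hq2⟩
  have hclos : ∀ v ns, pvLookup E v = some ns → ∀ u ∈ ns, (pvLookup E u).isSome := by
    intro v ns hl u hu
    unfold pvLookup at hl
    obtain ⟨q, hq1, hq2⟩ := Option.map_eq_some_iff.1 hl
    have hqmem := List.mem_of_find?_eq_some hq1
    rw [List.all_eq_true] at hcl
    have := hcl q hqmem
    rw [List.all_eq_true] at this
    exact hmemlookup u (this u (hq2 ▸ hu))
  have hvals : ∀ v ns, pvLookup E v = some ns → ∀ u ∈ ns, u ∈ s :: E.flatMap (·.2) := by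
    intro v ns hl u hu
    unfold pvLookup at hl
    obtain ⟨q, hq1, hq2⟩ := Option.map_eq_some_iff.1 hl
    have hqmem := List.mem_of_find?_eq_some hq1
    exact List.mem_cons_of_mem _ (List.mem_flatMap.2 ⟨q, hqmem, hq2 ▸ hu⟩)
  have hbound : pvFL (s :: E.flatMap (·.2)) (PySem.Dict.empty.insert s none) + 1
      ≤ (s :: E.flatMap (·.2)).length := by
    unfold pvFL
    have : ((s :: E.flatMap (·.2)).filter
        (fun x => !((PySem.Dict.empty.insert s (none : Option String)).contains x))).length
        ≤ (E.flatMap (·.2)).length := by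
      rw [List.filter_cons]
      simp only [PySem.Dict.contains_insert_self, Bool.not_true, Bool.false_eq_true, if_false]
      exact List.length_filter_le _ _
    simp only [List.length_cons]
    omega
  have hp0keys : (PySem.Dict.empty.insert s (none : Option String)).keys = [s] := by
    rw [PySem.Dict.keys_insert_of_not_contains _ _ (by simp [pysem])]
    simp [PySem.Dict.empty, PySem.Dict.keys]
  have hp0items : (PySem.Dict.empty.insert s (none : Option String)).items = [(s, none)] := by
    rw [PySem.Dict.items_insert_of_not_contains _ _ (by simp [pysem])]
    simp [PySem.Dict.empty]
  have hvis0 : PySem.Set.add PySem.Set.empty s = [s] := rfl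
  have hmain := pvMain E (s :: E.flatMap (·.2)) ((s :: E.flatMap (·.2)).length)
    (PySem.Dict.empty.insert s none) [s] [] ((s :: E.flatMap (·.2)).length)
    hvals hclos
    (by intro v hv; simp only [List.mem_singleton] at hv; rw [hv]; exact hmemlookup s hs)
    (by simpa using hbound) (by simpa using hbound)
  rw [hp0keys, hp0items] at hmain
  rw [hvis0, hmain, pv_items_ofList]
  have := pvLoopA_nodup E ((s :: E.flatMap (·.2)).length)
    (PySem.Dict.empty.insert s none) [s] []
    (by rw [hp0keys]; simp)
  simpa [PySem.Dict.keys] using this
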